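-- pv_equiv track=rewrite | github.com/SwagLyrics/SwagLyrics-discord-bot | swaglyrics_bot.py | chop_string_into_chunks
-- ===== SOURCE A (Python) =====
-- def chop_string_into_chunks(string, chunk_size):
--     chunk = ""
--     chunks = list()
--     last_char = None
--     for char in string:
--         if len(chunk) + 50 > chunk_size and char == "\n" or last_char == "\n" and char == "\n":
--             chunks.append(chunk)
--             chunk = ""
--         chunk += char
--         last_char = char
--     chunks.append(chunk)
--     return chunks
-- ===== SOURCE B (Python) =====
-- def chop_string_into_chunks(string, chunk_size):
--     # Group the newline-separated fields into lists first, join each group only at the end.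
--     fields = string.split('\n')
--     done = []
--     cur = [fields[0]]
--     size = len(fields[0])
--     prev_blank = False
--     for f in fields[1:]:
--         if size + 50 > chunk_size or prev_blank:
--             done.append(cur)
--             cur = [f]
--             size = 1 + len(f)
--         else:
--             cur.append(f)
--             size += 1 + len(f)
--         prev_blank = (f == '')
--     done.append(cur)
--     out = ['\n'.join(done[0])]
--     for g in done[1:]:
--         out.append('\n' + '\n'.join(g))
--     return out
-- ===== Notes on version B (the rewrite author's own statement) =====
-- stated objective: faster
-- what changed: B splits the string once on '\n' and groups the resulting fields into lists with a running size counter, joining each group into a chunk only at the end, instead of A's character-by-character scan that grows the current chunk one character at a time (avoids per-character loop work and repeated one-char string concatenation).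
import Mathlib
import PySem

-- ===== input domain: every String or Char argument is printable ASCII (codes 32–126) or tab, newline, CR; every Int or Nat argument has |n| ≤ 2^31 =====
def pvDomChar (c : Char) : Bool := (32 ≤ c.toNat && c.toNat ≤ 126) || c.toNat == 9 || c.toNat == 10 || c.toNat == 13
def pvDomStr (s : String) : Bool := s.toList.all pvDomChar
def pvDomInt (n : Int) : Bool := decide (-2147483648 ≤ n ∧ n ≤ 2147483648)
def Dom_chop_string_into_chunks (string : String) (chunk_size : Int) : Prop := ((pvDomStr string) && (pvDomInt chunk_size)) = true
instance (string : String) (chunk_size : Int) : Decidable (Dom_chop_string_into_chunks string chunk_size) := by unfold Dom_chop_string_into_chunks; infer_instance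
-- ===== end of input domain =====

-- B splits once on '\n', groups the fields into lists with a running size counter, and joins
-- each group only at the end, instead of A's character-by-character scan (alternative decomposition).

-- ===== PORT A =====
-- one iteration of A's `for char in string` loop; state = (chunks, chunk, last_char)
def chopStepA (chunk_size : Int) (st : List (List Char) × List Char × Option Char)
    (char : Char) : List (List Char) × List Char × Option Char :=
  let chunks := st.1
  let chunk := st.2.1
  let last_char := st.2.2
  let p := if ((chunk.length : Int) + 50 > chunk_size ∧ char = '\n') ∨
              (last_char = some '\n' ∧ char = '\n') then
      (chunks ++ [chunk], ([] : List Char))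
    else (chunks, chunk)
  (p.1, p.2 ++ [char], some char)

def chop_string_into_chunks (string : String) (chunk_size : Int) : List String :=
  let st := string.toList.foldl (chopStepA chunk_size) ([], [], none)
  (st.1 ++ [st.2.1]).map String.ofList

-- ===== PORT B =====
-- one iteration of B's `for f in fields[1:]` loop; state = (done, cur, size, prev_blank)
def chopStepB (chunk_size : Int) (st : List (List (List Char)) × List (List Char) × Int × Bool)
    (f : List Char) : List (List (List Char)) × List (List Char) × Int × Bool :=
  let done := st.1
  let cur := st.2.1
  let size := st.2.2.1
  let pb := st.2.2.2
  if size + 50 > chunk_size ∨ pb = true then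
    (done ++ [cur], [f], 1 + (f.length : Int), decide (f = []))
  else
    (done, cur ++ [f], size + 1 + (f.length : Int), decide (f = []))

def chop_string_into_chunks_alt (string : String) (chunk_size : Int) : List String :=
  match PySem.Chars.splitOn string.toList ['\n'] with
  | [] => []   -- unreachable: str.split never returns an empty list
  | f0 :: rest =>
    let st := rest.foldl (chopStepB chunk_size) ([], [f0], (f0.length : Int), false)
    match st.1 ++ [st.2.1] with
    | [] => []  -- unreachable: the last group is always appended
    | g0 :: gs =>
      String.ofList (List.intercalate ['\n'] g0) ::
        gs.map (fun g => String.ofList ('\n' :: List.intercalate ['\n'] g))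

-- ===== PRECONDITION & SPEC =====
def Spec_chop_string_into_chunks (string : String) (chunk_size : Int) (out : List String) : Prop := out = chop_string_into_chunks_alt string chunk_size
instance (string : String) (chunk_size : Int) (out : List String) : Decidable (Spec_chop_string_into_chunks string chunk_size out) := by unfold Spec_chop_string_into_chunks; infer_instance

-- ===== CLAIM (what is proved, stated in full; the proofs are below) =====
def Claim_equal_chop_string_into_chunks : Prop := ∀ (string : String) (chunk_size : Int), Dom_chop_string_into_chunks string chunk_size → Spec_chop_string_into_chunks string chunk_size (chop_string_into_chunks string chunk_size)

-- ===== LEMMAS AND PROOFS =====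

-- intermediate field-at-a-time loop used only in the proofs to bridge A's char scan and B's groups
def fieldStep (chunk_size : Int) (st : List (List Char) × List Char × Bool)
    (f : List Char) : List (List Char) × List Char × Bool :=
  if ((st.2.1.length : Int) + 50 > chunk_size) ∨ st.2.2 = true then
    (st.1 ++ [st.2.1], '\n' :: f, decide (f = []))
  else
    (st.1, st.2.1 ++ '\n' :: f, decide (f = []))

def J (g : List (List Char)) : List Char := List.intercalate ['\n'] g
def N (g : List (List Char)) : List Char := '\n' :: J g

def renderGroups : List (List (List Char)) → List (List Char)
  | [] => []
  | g :: gs => J g :: gs.map N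

-- PySem's fuelled splitOn with a one-character separator is Mathlib's splitOnP
lemma splitOn_go_single (c : Char) :
    ∀ fuel (l cur : List Char) (accs : List (List Char)), l.length ≤ fuel →
      PySem.Chars.splitOn.go [c] fuel l cur accs =
        accs.reverse ++ (List.splitOnP (· == c) l).modifyHead (cur.reverse ++ ·) := by
  intro fuel
  induction fuel with
  | zero =>
    intro l cur accs h
    have : l = [] := List.eq_nil_of_length_eq_zero (Nat.le_zero.mp h)
    subst this
    simp [PySem.Chars.splitOn.go, List.splitOnP, List.splitOnP.go]
  | succ n ih =>
    intro l cur accs h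
    cases l with
    | nil => simp [PySem.Chars.splitOn.go, List.splitOnP, List.splitOnP.go]
    | cons d rest =>
      by_cases hc : c = d
      · subst hc
        have : List.isPrefixOf [c] (c :: rest) = true := by simp [List.isPrefixOf]
        simp only [PySem.Chars.splitOn.go, this, if_pos, List.length_nil, List.length_cons,
          List.drop_succ_cons, List.drop_zero]
        rw [ih rest [] (cur.reverse :: accs) (by simpa using Nat.lt_succ_iff.mp (by simpa using h))]
        simp only [List.splitOnP_cons, beq_self_eq_true, if_true, List.modifyHead_cons,
          List.reverse_cons, List.append_assoc, List.singleton_append, List.reverse_nil]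
        cases List.splitOnP (fun x => x == c) rest <;> simp
      · have : List.isPrefixOf [c] (d :: rest) = false := by
          simp [List.isPrefixOf]; exact fun h' => hc h'
        simp only [PySem.Chars.splitOn.go, this, Bool.false_eq_true, if_false]
        rw [ih rest (d :: cur) accs (by simpa using Nat.lt_succ_iff.mp (by simpa using h))]
        have hbe : (d == c) = false := by simp; exact fun h' => hc h'.symm
        rw [List.splitOnP_cons]
        simp only [hbe, Bool.false_eq_true, if_false]
        cases List.splitOnP (· == c) rest <;> simp

lemma splitOn_single_eq (c : Char) (l : List Char) :
    PySem.Chars.splitOn l [c] = List.splitOnP (· == c) l := by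
  unfold PySem.Chars.splitOn
  rw [splitOn_go_single c (l.length + 1) l [] [] (by omega)]
  rcases List.splitOnP (fun x => x == c) l with _ | ⟨a, t⟩ <;> simp

lemma mem_splitOnP_not (p : Char → Bool) :
    ∀ (l : List Char) (f : List Char), f ∈ List.splitOnP p l → ∀ x ∈ f, p x = false := by
  intro l
  induction l with
  | nil =>
    intro f hf x hx
    simp [List.splitOnP, List.splitOnP.go] at hf
    subst hf; simp at hx
  | cons a t ih =>
    intro f hf x hx
    rw [List.splitOnP_cons] at hf
    by_cases hp : p a = true
    · simp only [hp, if_pos] at hf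
      rcases List.mem_cons.mp hf with h | h
      · subst h; simp at hx
      · exact ih f h x hx
    · simp only [hp, Bool.false_eq_true, if_false] at hf
      rcases hsp : List.splitOnP p t with _ | ⟨b, bs⟩
      · exact absurd hsp (List.splitOnP_ne_nil p t)
      · rw [hsp] at hf
        simp only [List.modifyHead] at hf
        rcases List.mem_cons.mp hf with h | h
        · subst h
          rcases List.mem_cons.mp hx with h | h
          · subst h; simpa using hp
          · exact ih b (by rw [hsp]; exact List.mem_cons_self) x h
        · exact ih f (by rw [hsp]; exact List.mem_cons_of_mem b h) x hx

lemma intercalate_single_char (c : Char) (f0 : List Char) (rest : List (List Char)) :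
    [c].intercalate (f0 :: rest) = f0 ++ rest.flatMap (fun f => c :: f) := by
  induction rest generalizing f0 with
  | nil => simp [List.intercalate]
  | cons g gs ih =>
    have := ih g
    simp only [List.intercalate] at this ⊢
    simp [List.intersperse] at this ⊢
    rw [this]

lemma J_append_single (cur : List (List Char)) (f : List Char) (h : cur ≠ []) :
    J (cur ++ [f]) = J cur ++ '\n' :: f := by
  rcases cur with _ | ⟨c0, cs⟩
  · exact absurd rfl h
  · show [('\n' : Char)].intercalate ((c0 :: cs) ++ [f]) = [('\n' : Char)].intercalate (c0 :: cs) ++ '\n' :: f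
    rw [List.cons_append, intercalate_single_char, intercalate_single_char]
    simp [List.flatMap_append]

-- tracks A's `last_char` across a field
def lastO (f : List Char) (lc : Option Char) : Option Char :=
  f.foldl (fun _ x => some x) lc

lemma lastO_newline_iff (f : List Char) (lc : Option Char) (hf : ∀ x ∈ f, x ≠ '\n') :
    (lastO f lc = some '\n') ↔ (f = [] ∧ lc = some '\n') := by
  induction f generalizing lc with
  | nil => simp [lastO]
  | cons a t ih =>
    simp only [lastO, List.foldl_cons]
    rw [show (t.foldl (fun _ x => some x) (some a)) = lastO t (some a) from rfl]
    rw [ih (some a) (fun x hx => hf x (List.mem_cons_of_mem a hx))]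
    simp only [List.cons_ne_nil, false_and, iff_false, not_and]
    intro _ h
    exact hf a List.mem_cons_self (by injection h)

-- A's loop over a newline-free field just appends it to the current chunk
lemma foldA_nosplit (cs : Int) (f : List Char) (hf : ∀ x ∈ f, x ≠ '\n') :
    ∀ (chunks : List (List Char)) (chunk : List Char) (lc : Option Char),
      f.foldl (chopStepA cs) (chunks, chunk, lc) = (chunks, chunk ++ f, lastO f lc) := by
  induction f with
  | nil => intro chunks chunk lc; simp [lastO]
  | cons a t ih =>
    intro chunks chunk lc
    have ha : a ≠ '\n' := hf a List.mem_cons_self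
    have step : chopStepA cs (chunks, chunk, lc) a = (chunks, chunk ++ [a], some a) := by
      simp [chopStepA, ha]
    rw [List.foldl_cons, step,
      ih (fun x hx => hf x (List.mem_cons_of_mem a hx)) chunks (chunk ++ [a]) (some a)]
    simp [lastO]

-- correspondence between A's char loop over the remaining fields and the field-at-a-time loop
lemma chop_main (cs : Int) :
    ∀ (rest : List (List Char)), (∀ f ∈ rest, ∀ x ∈ f, x ≠ '\n') →
    ∀ (chunks : List (List Char)) (chunk : List Char) (lc : Option Char) (pb : Bool),
      ((lc = some '\n') ↔ pb = true) →
      let a := (rest.flatMap (fun f => '\n' :: f)).foldl (chopStepA cs) (chunks, chunk, lc)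
      let b := rest.foldl (fieldStep cs) (chunks, chunk, pb)
      a.1 = b.1 ∧ a.2.1 = b.2.1 ∧ ((a.2.2 = some '\n') ↔ b.2.2 = true) := by
  intro rest
  induction rest with
  | nil =>
    intro _ chunks chunk lc pb h
    exact ⟨rfl, rfl, h⟩
  | cons f rest ih =>
    intro hnl chunks chunk lc pb h
    have hf : ∀ x ∈ f, x ≠ '\n' := hnl f List.mem_cons_self
    have hrest : ∀ g ∈ rest, ∀ x ∈ g, x ≠ '\n' :=
      fun g hg => hnl g (List.mem_cons_of_mem f hg)
    simp only [List.flatMap_cons, List.foldl_cons, List.foldl_append]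
    have hcond : ((((chunk.length : Int) + 50 > cs) ∧ True) ∨
        ((lc = some '\n') ∧ True)) ↔
        (((chunk.length : Int) + 50 > cs) ∨ pb = true) := by
      constructor
      · rintro (⟨h1, _⟩ | ⟨h2, _⟩)
        · exact Or.inl h1
        · exact Or.inr (h.mp h2)
      · rintro (h1 | h2)
        · exact Or.inl ⟨h1, trivial⟩
        · exact Or.inr ⟨h.mpr h2, trivial⟩
    by_cases hsplit : ((chunk.length : Int) + 50 > cs) ∨ pb = true
    · have stepA : chopStepA cs (chunks, chunk, lc) '\n' =
          (chunks ++ [chunk], [] ++ ['\n'], some '\n') := by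
        simp only [chopStepA]
        rw [if_pos (hcond.mpr hsplit)]
      have stepB : fieldStep cs (chunks, chunk, pb) f =
          (chunks ++ [chunk], '\n' :: f, decide (f = [])) := by
        simp only [fieldStep]
        rw [if_pos hsplit]
      rw [stepA, stepB, foldA_nosplit cs f hf]
      have := ih hrest (chunks ++ [chunk]) ('\n' :: f) (lastO f (some '\n'))
        (decide (f = [])) (by rw [lastO_newline_iff f (some '\n') hf]; simp)
      simpa using this
    · have stepA : chopStepA cs (chunks, chunk, lc) '\n' =
          (chunks, chunk ++ ['\n'], some '\n') := by
        simp only [chopStepA]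
        rw [if_neg (fun hh => hsplit (hcond.mp hh))]
      have stepB : fieldStep cs (chunks, chunk, pb) f =
          (chunks, chunk ++ '\n' :: f, decide (f = [])) := by
        simp only [fieldStep]
        rw [if_neg hsplit]
      rw [stepA, stepB, foldA_nosplit cs f hf]
      have := ih hrest chunks (chunk ++ '\n' :: f) (lastO f (some '\n'))
        (decide (f = [])) (by rw [lastO_newline_iff f (some '\n') hf]; simp)
      simpa using this

-- B's fold only ever appends finished groups to `done`
lemma foldB_done_ext (cs : Int) :
    ∀ (rest : List (List Char)) (done : List (List (List Char))) (cur : List (List Char))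
      (size : Int) (pb : Bool),
      ∃ delta, (rest.foldl (chopStepB cs) (done, cur, size, pb)).1 = done ++ delta := by
  intro rest
  induction rest with
  | nil => intro done cur size pb; exact ⟨[], by simp⟩
  | cons f rest ih =>
    intro done cur size pb
    rw [List.foldl_cons]
    by_cases h : size + 50 > cs ∨ pb = true
    · have step : chopStepB cs (done, cur, size, pb) f =
          (done ++ [cur], [f], 1 + (f.length : Int), decide (f = [])) := by
        simp only [chopStepB]; rw [if_pos h]
      rw [step]
      obtain ⟨d, hd⟩ := ih (done ++ [cur]) [f] (1 + (f.length : Int)) (decide (f = []))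
      exact ⟨[cur] ++ d, by rw [hd]; simp⟩
    · have step : chopStepB cs (done, cur, size, pb) f =
          (done, cur ++ [f], size + 1 + (f.length : Int), decide (f = [])) := by
        simp only [chopStepB]; rw [if_neg h]
      rw [step]
      exact ih done (cur ++ [f]) (size + 1 + (f.length : Int)) (decide (f = []))

-- once a split has happened, every chunk the field loop produces is the '\n'-prefixed join of a group
lemma foldB_uniform (cs : Int) :
    ∀ (rest : List (List Char)) (chunks : List (List Char)) (done : List (List (List Char)))
      (cur : List (List Char)) (size : Int) (pb : Bool),
      cur ≠ [] → size = ((N cur).length : Int) →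
      rest.foldl (fieldStep cs) (chunks, N cur, pb) =
        ((fun st => (chunks ++ (st.1.drop done.length).map N, N st.2.1, st.2.2.2))
          (rest.foldl (chopStepB cs) (done, cur, size, pb))) := by
  intro rest
  induction rest with
  | nil =>
    intro chunks done cur size pb _ _
    simp [List.drop_length]
  | cons f rest ih =>
    intro chunks done cur size pb hcur hsize
    rw [List.foldl_cons, List.foldl_cons]
    by_cases h : size + 50 > cs ∨ pb = true
    · have hcond : (((N cur).length : Int) + 50 > cs) ∨ pb = true := by rw [← hsize]; exact h
      have stepF : fieldStep cs (chunks, N cur, pb) f =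
          (chunks ++ [N cur], '\n' :: f, decide (f = [])) := by
        simp only [fieldStep]; rw [if_pos hcond]
      have stepB : chopStepB cs (done, cur, size, pb) f =
          (done ++ [cur], [f], 1 + (f.length : Int), decide (f = [])) := by
        simp only [chopStepB]; rw [if_pos h]
      rw [stepF, stepB]
      have hNf : ('\n' :: f) = N [f] := by simp [N, J, List.intercalate]
      rw [hNf, ih (chunks ++ [N cur]) (done ++ [cur]) [f] (1 + (f.length : Int))
        (decide (f = [])) (by simp) (by simp [N, J, List.intercalate]; ring)]
      obtain ⟨delta, hdelta⟩ :=
        foldB_done_ext cs rest (done ++ [cur]) [f] (1 + (f.length : Int)) (decide (f = []))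
      rcases hst : List.foldl (chopStepB cs) (done ++ [cur], [f], 1 + (f.length : Int),
          decide (f = [])) rest with ⟨d1, c1, s1, pb1⟩
      rw [hst] at hdelta
      simp only at hdelta ⊢
      rw [hdelta]
      have h1 : ((done ++ [cur]) ++ delta).drop (done ++ [cur]).length = delta := by
        rw [List.drop_left]
      have h2 : ((done ++ [cur]) ++ delta).drop done.length = cur :: delta := by
        rw [List.append_assoc, List.drop_left]
        rfl
      rw [h1, h2]
      simp [List.append_assoc]
    · have hcond : ¬ ((((N cur).length : Int) + 50 > cs) ∨ pb = true) := by rw [← hsize]; exact h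
      have stepF : fieldStep cs (chunks, N cur, pb) f =
          (chunks, N cur ++ '\n' :: f, decide (f = [])) := by
        simp only [fieldStep]; rw [if_neg hcond]
      have stepB : chopStepB cs (done, cur, size, pb) f =
          (done, cur ++ [f], size + 1 + (f.length : Int), decide (f = [])) := by
        simp only [chopStepB]; rw [if_neg h]
      rw [stepF, stepB]
      have hN : N cur ++ '\n' :: f = N (cur ++ [f]) := by
        simp [N, J_append_single cur f hcur]
      rw [hN, ih chunks done (cur ++ [f]) (size + 1 + (f.length : Int)) (decide (f = []))
        (by simp) (by rw [hsize]; simp [N, J_append_single cur f hcur]; ring)]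

-- the first-group regime: starting from the unprefixed join of the first group
lemma foldB_first (cs : Int) :
    ∀ (rest : List (List Char)) (cur : List (List Char)) (size : Int) (pb : Bool),
      cur ≠ [] → size = ((J cur).length : Int) →
      ((fun o => o.1 ++ [o.2.1]) (rest.foldl (fieldStep cs) ([], J cur, pb))) =
        ((fun st => renderGroups (st.1 ++ [st.2.1]))
          (rest.foldl (chopStepB cs) ([], cur, size, pb))) := by
  intro rest
  induction rest with
  | nil =>
    intro cur size pb _ _
    simp [renderGroups]
  | cons f rest ih =>
    intro cur size pb hcur hsize
    rw [List.foldl_cons, List.foldl_cons]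
    by_cases h : size + 50 > cs ∨ pb = true
    · have hcond : (((J cur).length : Int) + 50 > cs) ∨ pb = true := by rw [← hsize]; exact h
      have stepF : fieldStep cs ([], J cur, pb) f =
          ([J cur], '\n' :: f, decide (f = [])) := by
        simp only [fieldStep]; rw [if_pos hcond]; simp
      have stepB : chopStepB cs ([], cur, size, pb) f =
          ([cur], [f], 1 + (f.length : Int), decide (f = [])) := by
        simp only [chopStepB]; rw [if_pos h]; simp
      rw [stepF, stepB]
      have hNf : ('\n' :: f) = N [f] := by simp [N, J, List.intercalate]
      rw [hNf, foldB_uniform cs rest [J cur] [cur] [f] (1 + (f.length : Int))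
        (decide (f = [])) (by simp) (by simp [N, J, List.intercalate]; ring)]
      obtain ⟨delta, hdelta⟩ :=
        foldB_done_ext cs rest [cur] [f] (1 + (f.length : Int)) (decide (f = []))
      rcases hst : List.foldl (chopStepB cs) ([cur], [f], 1 + (f.length : Int),
          decide (f = [])) rest with ⟨d1, c1, s1, pb1⟩
      rw [hst] at hdelta
      simp only at hdelta ⊢
      rw [hdelta]
      simp [renderGroups]
    · have hcond : ¬ ((((J cur).length : Int) + 50 > cs) ∨ pb = true) := by rw [← hsize]; exact h
      have stepF : fieldStep cs ([], J cur, pb) f =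
          ([], J cur ++ '\n' :: f, decide (f = [])) := by
        simp only [fieldStep]; rw [if_neg hcond]
      have stepB : chopStepB cs ([], cur, size, pb) f =
          ([], cur ++ [f], size + 1 + (f.length : Int), decide (f = [])) := by
        simp only [chopStepB]; rw [if_neg h]
      rw [stepF, stepB]
      have hJ : J cur ++ '\n' :: f = J (cur ++ [f]) := (J_append_single cur f hcur).symm
      rw [hJ]
      exact ih (cur ++ [f]) (size + 1 + (f.length : Int)) (decide (f = []))
        (by simp) (by rw [hsize]; simp [J_append_single cur f hcur]; ring)

-- ===== VERDICT (by name: the statement is the Claim_ definition above) =====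
theorem chop_string_into_chunks_spec : Claim_equal_chop_string_into_chunks := by
  intro string cs _
  unfold Spec_chop_string_into_chunks
  unfold chop_string_into_chunks chop_string_into_chunks_alt
  rcases hsp : PySem.Chars.splitOn string.toList ['\n'] with _ | ⟨f0, rest⟩
  · rw [splitOn_single_eq] at hsp
    exact absurd hsp (List.splitOnP_ne_nil _ _)
  · rw [splitOn_single_eq] at hsp
    have hdecomp : string.toList = f0 ++ rest.flatMap (fun f => '\n' :: f) := by
      have := List.intercalate_splitOn string.toList '\n'
      rw [show List.splitOn '\n' string.toList = List.splitOnP (· == '\n') string.toList from rfl,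
        hsp] at this
      rw [← this, intercalate_single_char]
    have hmem : ∀ f ∈ f0 :: rest, ∀ x ∈ f, x ≠ '\n' := by
      intro f hf x hx
      have := mem_splitOnP_not (· == '\n') string.toList f (by rw [hsp]; exact hf) x hx
      simpa using this
    have hf0 : ∀ x ∈ f0, x ≠ '\n' := hmem f0 List.mem_cons_self
    have hrest : ∀ f ∈ rest, ∀ x ∈ f, x ≠ '\n' :=
      fun f hf => hmem f (List.mem_cons_of_mem f0 hf)
    rw [hdecomp, List.foldl_append, foldA_nosplit cs f0 hf0 [] [] none]
    have hinv : ((lastO f0 none = some '\n') ↔ (false : Bool) = true) := by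
      rw [lastO_newline_iff f0 none hf0]; simp
    have hAF := chop_main cs rest hrest [] f0 (lastO f0 none) false hinv
    have hJf0 : J [f0] = f0 := by simp [J, List.intercalate]
    have hFB := foldB_first cs rest [f0] ((f0.length : Int)) false (by simp) (by rw [hJf0])
    rw [hJf0] at hFB
    simp only [List.nil_append] at hAF hFB ⊢
    rw [hAF.1, hAF.2.1, hFB]
    rcases hgr : (List.foldl (chopStepB cs) ([], [f0], (f0.length : Int), false) rest).1 ++
        [(List.foldl (chopStepB cs) ([], [f0], (f0.length : Int), false) rest).2.1]
      with _ | ⟨g0, gs⟩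
    · simp [renderGroups]
    · simp only [renderGroups, List.map_cons, List.map_map]
      rfl
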